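-- pv_equiv track=rewrite | github.com/SonDo580/dsa-leetcode | 2-Hashing/2.3-More/02.min-cards-to-pickup.py | min_cards_to_pickup
-- ===== SOURCE A (Python) =====
-- from collections import defaultdict
--
-- def min_cards_to_pickup(cards: list[int]) -> int:
--     indices_dict: defaultdict[int, list[int]] = defaultdict(list)
--     for i in range(len(cards)):
--         indices_dict[cards[i]].append(i)
--
--     min_distance = float("inf")
--     for indices in indices_dict.values():
--         for i in range(len(indices) - 1):
--             min_distance = min(min_distance, indices[i + 1] - indices[i] + 1)
--
--     return min_distance if min_distance < float("inf") else -1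
-- ===== SOURCE B (Python) =====
-- def min_cards_to_pickup(cards: list[int]) -> int:
--     last: dict[int, int] = {}
--     min_distance = float("inf")
--     for i, value in enumerate(cards):
--         if value in last:
--             min_distance = min(min_distance, i - last[value] + 1)
--         last[value] = i
--     return min_distance if min_distance < float("inf") else -1
-- ===== Notes on version B (the rewrite author's own statement) =====
-- stated objective: simpler
-- what changed: Single flat pass keeping only the last-seen index per value and folding the running minimum on the fly, instead of first building per-value index lists in a dict and then a second nested loop over all lists of consecutive indices.
import Mathlib
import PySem

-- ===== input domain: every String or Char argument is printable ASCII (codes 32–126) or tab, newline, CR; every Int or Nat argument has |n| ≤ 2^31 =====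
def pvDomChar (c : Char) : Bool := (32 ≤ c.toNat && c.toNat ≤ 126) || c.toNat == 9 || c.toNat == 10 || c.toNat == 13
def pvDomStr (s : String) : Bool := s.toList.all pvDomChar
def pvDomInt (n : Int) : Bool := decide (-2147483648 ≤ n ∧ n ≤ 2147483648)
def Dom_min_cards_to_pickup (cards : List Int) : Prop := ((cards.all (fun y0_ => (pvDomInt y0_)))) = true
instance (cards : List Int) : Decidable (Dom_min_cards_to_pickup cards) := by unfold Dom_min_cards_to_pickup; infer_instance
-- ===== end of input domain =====

-- B replaces A's group-then-scan (per-value index lists, then a nested loop over consecutive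
-- indices) by a single flat pass that keeps only the last-seen index per value: simpler, no inner loop.

-- ===== PORT A =====
def min_cards_to_pickup (cards : List Int) : Int :=
  let indices_dict : PySem.Dict Int (List Int) :=
    (PySem.List.pyRange 0 (PySem.List.len cards) 1).foldl
      (fun d i => d.modify (PySem.List.pyGetD cards i 0) [] (fun l => l ++ [i]))
      PySem.Dict.empty
  let min_distance : Option Int :=   -- none models float("inf")
    indices_dict.values.foldl
      (fun m indices =>
        (PySem.List.pyRange 0 (PySem.List.len indices - 1) 1).foldl
          (fun m i =>
            some (match m with
                  | none => PySem.List.pyGetD indices (i+1) 0 - PySem.List.pyGetD indices i 0 + 1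
                  | some b => min b (PySem.List.pyGetD indices (i+1) 0 - PySem.List.pyGetD indices i 0 + 1)))
          m)
      none
  match min_distance with
  | some b => b
  | none => -1

-- ===== PORT B =====
def min_cards_to_pickup_alt (cards : List Int) : Int :=
  let st : PySem.Dict Int Int × Option Int :=   -- (last-seen index per value, running min; none = inf)
    (PySem.List.enumerate cards 0).foldl
      (fun st p =>
        let m := match st.1.get? p.2 with
          | some j => some (match st.2 with
                            | none => p.1 - j + 1
                            | some b => min b (p.1 - j + 1))
          | none => st.2
        (st.1.insert p.2 p.1, m))
      (PySem.Dict.empty, none)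
  match st.2 with
  | some b => b
  | none => -1

-- ===== PRECONDITION & SPEC =====
def Spec_min_cards_to_pickup (cards : List Int) (out : Int) : Prop := out = min_cards_to_pickup_alt cards
instance (cards : List Int) (out : Int) : Decidable (Spec_min_cards_to_pickup cards out) := by unfold Spec_min_cards_to_pickup; infer_instance

-- ===== CLAIM (what is proved, stated in full; the proofs are below) =====
def Claim_equal_min_cards_to_pickup : Prop := ∀ (cards : List Int), Dom_min_cards_to_pickup cards → Spec_min_cards_to_pickup cards (min_cards_to_pickup cards)

-- ===== LEMMAS AND PROOFS =====

-- none models float("inf"); pvOmin m g = min(m, g) with ints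
def pvOmin (m : Option Int) (g : Int) : Option Int :=
  some (match m with | none => g | some b => min b g)

-- consecutive "pick-up" gaps of an index list
def pvGaps : List Int → List Int
  | [] => []
  | [_] => []
  | a :: b :: t => (b - a + 1) :: pvGaps (b :: t)

-- the indices at which value v occurs in cards
def pvIdx (cards : List Int) (v : Int) : List Int :=
  List.map (fun p => p.1) (List.filter (fun p => p.2 == v) (PySem.List.enumerate cards 0))

-- the common value of both programs, as an Option Int
def pvTotal (cards : List Int) : Option Int :=
  List.foldl (fun m k => List.foldl pvOmin m (pvGaps (pvIdx cards k))) none (PySem.Set.ofList cards)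

-- A's grouping dict
def pvDictA (cards : List Int) : PySem.Dict Int (List Int) :=
  (PySem.List.pyRange 0 (PySem.List.len cards) 1).foldl
    (fun d i => d.modify (PySem.List.pyGetD cards i 0) [] (fun l => l ++ [i]))
    PySem.Dict.empty

-- B's loop state
def pvBstate (xs : List Int) : PySem.Dict Int Int × Option Int :=
  (PySem.List.enumerate xs 0).foldl
    (fun st p =>
      let m := match st.1.get? p.2 with
        | some j => some (match st.2 with
                          | none => p.1 - j + 1
                          | some b => min b (p.1 - j + 1))
        | none => st.2
      (st.1.insert p.2 p.1, m))
    (PySem.Dict.empty, none)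

theorem pvOmin_comm (m : Option Int) (a b : Int) :
    pvOmin (pvOmin m a) b = pvOmin (pvOmin m b) a := by
  cases m <;> simp [pvOmin, min_comm, min_left_comm]

theorem pvPull (gs : List Int) (m : Option Int) (g : Int) :
    gs.foldl pvOmin (pvOmin m g) = pvOmin (gs.foldl pvOmin m) g := by
  induction gs generalizing m with
  | nil => rfl
  | cons a t ih => simp only [List.foldl_cons, pvOmin_comm m g a, ih]

theorem pvOuterPull (keys : List Int) (F : Int → List Int) (m : Option Int) (g : Int) :
    keys.foldl (fun m k => (F k).foldl pvOmin m) (pvOmin m g)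
      = pvOmin (keys.foldl (fun m k => (F k).foldl pvOmin m) m) g := by
  induction keys generalizing m with
  | nil => rfl
  | cons a t ih => simp only [List.foldl_cons, pvPull, ih]

theorem pvKeyUpdate (keys : List Int) (F F' : Int → List Int) (x g : Int)
    (hnd : keys.Nodup) (hx : x ∈ keys)
    (hne : ∀ k, k ≠ x → F' k = F k) (hFx : F' x = F x ++ [g]) :
    ∀ m, keys.foldl (fun m k => (F' k).foldl pvOmin m) m
      = pvOmin (keys.foldl (fun m k => (F k).foldl pvOmin m) m) g := by
  induction keys with
  | nil => cases hx
  | cons a t ih =>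
    intro m
    rcases List.mem_cons.mp hx with hxa | hxt
    · have hnot : x ∉ t := hxa ▸ (List.nodup_cons.mp hnd).1
      rw [← hxa]
      simp only [List.foldl_cons, hFx, List.foldl_append, List.foldl_cons, List.foldl_nil]
      have hcg : t.foldl (fun m k => (F' k).foldl pvOmin m)
          (pvOmin ((F x).foldl pvOmin m) g)
          = t.foldl (fun m k => (F k).foldl pvOmin m)
          (pvOmin ((F x).foldl pvOmin m) g) := by
        apply PySem.List.foldl_congr_mem
        intro acc k hk
        rw [hne k (fun h => hnot (h ▸ hk))]
      rw [hcg, pvOuterPull]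
    · have hax : a ≠ x := by
        rintro rfl; exact (List.nodup_cons.mp hnd).1 hxt
      simp only [List.foldl_cons, hne a hax]
      exact ih (List.nodup_cons.mp hnd).2 hxt _

theorem pvGaps_append (l : List Int) (y : Int) (h : l ≠ []) :
    pvGaps (l ++ [y]) = pvGaps l ++ [y - (l.getLast?.getD 0) + 1] := by
  induction l with
  | nil => exact absurd rfl h
  | cons a t ih =>
    cases t with
    | nil => simp [pvGaps]
    | cons b t' =>
      have : (a :: b :: t') ++ [y] = a :: b :: (t' ++ [y]) := by simp
      rw [this]
      show (b - a + 1) :: pvGaps (b :: (t' ++ [y])) = _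
      have h2 : (b :: t') ++ [y] = b :: (t' ++ [y]) := by simp
      rw [← h2, ih (List.cons_ne_nil _ _)]
      simp [pvGaps, List.getLast?_cons_cons]

theorem pvGetD_cons_succ (a : Int) (l : List Int) (k : Nat) (d : Int) :
    PySem.List.pyGetD (a :: l) ((k : Int) + 1) d = PySem.List.pyGetD l (k : Int) d := by
  rw [show ((k : Int) + 1) = ((k + 1 : Nat) : Int) by push_cast; ring,
    PySem.List.pyGetD_natCast, PySem.List.pyGetD_natCast]
  simp

theorem pvInner_map (l : List Int) :
    (PySem.List.pyRange 0 (PySem.List.len l - 1) 1).map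
      (fun i => PySem.List.pyGetD l (i+1) 0 - PySem.List.pyGetD l i 0 + 1) = pvGaps l := by
  induction l with
  | nil => rfl
  | cons a t ih =>
    cases t with
    | nil => rfl
    | cons b t' =>
      rw [PySem.List.pyRange_one] at ih ⊢
      have hlen : (PySem.List.len (a :: b :: t') - 1 - 0).toNat = t'.length + 1 := by
        simp [PySem.List.len]
      have hlen' : (PySem.List.len (b :: t') - 1 - 0).toNat = t'.length := by
        simp [PySem.List.len]
      rw [hlen]
      rw [hlen'] at ih
      rw [List.range_succ_eq_map]
      show _ :: _ = pvGaps (a :: b :: t')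
      have hhead : PySem.List.pyGetD (a :: b :: t') ((0:Int) + ↑(0:Nat) + 1) 0 -
          PySem.List.pyGetD (a :: b :: t') ((0:Int) + ↑(0:Nat)) 0 + 1 = b - a + 1 := by
        rw [show ((0:Int) + ↑(0:Nat) + 1) = (((1:Nat) : Int)) by norm_num,
          show ((0:Int) + ↑(0:Nat)) = (((0:Nat) : Int)) by norm_num,
          PySem.List.pyGetD_natCast, PySem.List.pyGetD_natCast]
        rfl
      simp only [List.map_map]
      show (PySem.List.pyGetD (a :: b :: t') (0 + (0:Nat) + 1) 0 -
          PySem.List.pyGetD (a :: b :: t') (0 + (0:Nat)) 0 + 1) :: _ = _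
      rw [hhead]
      show _ = (b - a + 1) :: pvGaps (b :: t')
      congr 1
      rw [← ih, List.map_map]
      apply List.map_congr_left
      intro k _
      simp only [Function.comp_apply]
      have c1 : (0 : Int) + ↑(Nat.succ k) = ((k : Int) + 1) := by push_cast; ring
      have c2 : (0 : Int) + (k : Int) = (k : Int) := by ring
      rw [c1, c2, pvGetD_cons_succ]
      congr 1
      rw [show ((k : Int) + 1 + 1) = (((k+1) : Nat) : Int) + 1 by push_cast; ring,
        pvGetD_cons_succ]
      push_cast; ring_nf

theorem pvInner_fold (l : List Int) (m : Option Int) :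
    (PySem.List.pyRange 0 (PySem.List.len l - 1) 1).foldl
      (fun m i =>
        some (match m with
              | none => PySem.List.pyGetD l (i+1) 0 - PySem.List.pyGetD l i 0 + 1
              | some b => min b (PySem.List.pyGetD l (i+1) 0 - PySem.List.pyGetD l i 0 + 1)))
      m = (pvGaps l).foldl pvOmin m := by
  rw [← pvInner_map l, List.foldl_map]
  rfl

theorem pvDictA_eq (cards : List Int) :
    pvDictA cards = ((PySem.List.enumerate cards 0).map (fun p => (p.2, p.1))).foldl
      (fun d p => d.modify p.1 [] (fun l => l ++ [p.2])) PySem.Dict.empty := by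
  rw [PySem.List.enumerate_eq_map_pyRange cards 0, List.map_map, List.foldl_map]
  rfl

theorem pvDictA_getD (cards : List Int) (v : Int) :
    (pvDictA cards).getD v [] = pvIdx cards v := by
  rw [pvDictA_eq, PySem.Dict.getD_foldl_modify_append]
  simp [pvIdx, List.filter_map, List.map_map, Function.comp_def]

theorem pvDictA_keys (cards : List Int) :
    (pvDictA cards).keys = PySem.Set.ofList cards := by
  rw [pvDictA_eq,
    PySem.Dict.keys_foldl_modify_key _ Prod.fst [] (fun _ p l => l ++ [p.2])]
  rw [List.map_map]
  have hfe : (Prod.fst ∘ fun p : Int × Int => (p.2, p.1)) = (fun p : Int × Int => p.2) := by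
    funext p; rfl
  rw [hfe, PySem.List.map_snd_enumerate]
  simp [PySem.Dict.keys, PySem.Dict.empty, PySem.Set.update_nil_left]

theorem pvA_eq (cards : List Int) :
    min_cards_to_pickup cards = (match pvTotal cards with | some b => b | none => -1) := by
  show (match ((pvDictA cards).values.foldl _ none : Option Int) with
        | some b => b | none => -1) = _
  have hnd : (pvDictA cards).keys.Nodup := by
    rw [pvDictA_keys]; exact PySem.Set.nodup_ofList cards
  rw [PySem.Dict.values_eq_map_keys _ hnd ([] : List Int), List.foldl_map, pvDictA_keys]
  have hbody : (fun (m : Option Int) (k : Int) =>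
      (PySem.List.pyRange 0 (PySem.List.len ((pvDictA cards).getD k []) - 1) 1).foldl
        (fun m i =>
          some (match m with
                | none => PySem.List.pyGetD ((pvDictA cards).getD k []) (i+1) 0 -
                          PySem.List.pyGetD ((pvDictA cards).getD k []) i 0 + 1
                | some b => min b (PySem.List.pyGetD ((pvDictA cards).getD k []) (i+1) 0 -
                          PySem.List.pyGetD ((pvDictA cards).getD k []) i 0 + 1)))
        m)
      = (fun m k => (pvGaps (pvIdx cards k)).foldl pvOmin m) := by
    funext m k
    rw [pvInner_fold, pvDictA_getD]
  rw [hbody]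
  rfl

theorem pvIdx_append (xs : List Int) (x v : Int) :
    pvIdx (xs ++ [x]) v = pvIdx xs v ++ (if v = x then [(xs.length : Int)] else []) := by
  simp only [pvIdx, PySem.List.enumerate_append, List.filter_append, List.map_append]
  congr 1
  show List.map _ (List.filter _ (PySem.List.enumerate [x] (0 + ↑xs.length))) = _
  simp only [PySem.List.enumerate]
  by_cases h : v = x
  · simp [h]
  · have : (x == v) = false := by simp [Ne.symm h]
    simp [h, this]

theorem pvIdx_nil_iff (xs : List Int) (v : Int) :
    pvIdx xs v = [] ↔ v ∉ xs := by
  simp only [pvIdx, List.map_eq_nil_iff, List.filter_eq_nil_iff]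
  constructor
  · intro h hv
    rw [← PySem.List.map_snd_enumerate xs 0] at hv
    rcases List.mem_map.mp hv with ⟨p, hp, hpv⟩
    exact h p hp (by simp [hpv])
  · intro hv p hp hbeq
    apply hv
    rw [← PySem.List.map_snd_enumerate xs 0]
    exact List.mem_map.mpr ⟨p, hp, by simpa using hbeq⟩

theorem pvSet_append_mem (xs : List Int) (x : Int) (h : x ∈ xs) :
    PySem.Set.ofList (xs ++ [x]) = PySem.Set.ofList xs := by
  rw [PySem.Set.ofList_append, PySem.Set.update_cons, PySem.Set.update_nil]
  simp [PySem.Set.add, h]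

theorem pvSet_append_not_mem (xs : List Int) (x : Int) (h : x ∉ xs) :
    PySem.Set.ofList (xs ++ [x]) = PySem.Set.ofList xs ++ [x] := by
  rw [PySem.Set.ofList_append, PySem.Set.update_cons, PySem.Set.update_nil]
  simp [PySem.Set.add, h]

theorem pvTotal_fresh (xs : List Int) (x : Int) (h : x ∉ xs) :
    pvTotal (xs ++ [x]) = pvTotal xs := by
  unfold pvTotal
  rw [pvSet_append_not_mem xs x h, List.foldl_append]
  have hlast : pvIdx (xs ++ [x]) x = [(xs.length : Int)] := by
    rw [pvIdx_append, if_pos rfl, (pvIdx_nil_iff xs x).mpr h]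
    simp
  have hcg : (PySem.Set.ofList xs).foldl
      (fun m k => (pvGaps (pvIdx (xs ++ [x]) k)).foldl pvOmin m) none
      = (PySem.Set.ofList xs).foldl
      (fun m k => (pvGaps (pvIdx xs k)).foldl pvOmin m) none := by
    apply PySem.List.foldl_congr_mem
    intro acc k hk
    have hkx : k ≠ x := fun he => h (he ▸ (PySem.Set.mem_ofList xs k).mp hk)
    rw [pvIdx_append, if_neg hkx, List.append_nil]
  simp only [List.foldl_cons, List.foldl_nil, hcg, hlast]
  rfl

theorem pvTotal_dup (xs : List Int) (x : Int) (h : x ∈ xs) :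
    pvTotal (xs ++ [x])
      = pvOmin (pvTotal xs) ((xs.length : Int) - (pvIdx xs x).getLast?.getD 0 + 1) := by
  unfold pvTotal
  rw [pvSet_append_mem xs x h]
  have hne : pvIdx xs x ≠ [] := fun he => ((pvIdx_nil_iff xs x).mp he) h
  apply pvKeyUpdate (PySem.Set.ofList xs)
    (fun k => pvGaps (pvIdx xs k)) (fun k => pvGaps (pvIdx (xs ++ [x]) k)) x _
    (PySem.Set.nodup_ofList xs) ((PySem.Set.mem_ofList xs x).mpr h)
  · intro k hk
    rw [pvIdx_append, if_neg hk, List.append_nil]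
  · rw [pvIdx_append, if_pos rfl, pvGaps_append _ _ hne]

theorem pvBstate_append (xs : List Int) (x : Int) :
    pvBstate (xs ++ [x])
      = ((pvBstate xs).1.insert x ((xs.length : Int)),
         match (pvBstate xs).1.get? x with
         | some j => pvOmin (pvBstate xs).2 ((xs.length : Int) - j + 1)
         | none => (pvBstate xs).2) := by
  cases hg : (pvBstate xs).1.get? x <;>
  · unfold pvBstate at hg ⊢
    rw [PySem.List.enumerate_append, List.foldl_append]
    simp only [PySem.List.enumerate_cons, PySem.List.enumerate_nil,
      List.foldl_cons, List.foldl_nil, zero_add, hg, pvOmin]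

theorem pvB_last (xs : List Int) (v : Int) :
    (pvBstate xs).1.get? v = (pvIdx xs v).getLast? := by
  induction xs using List.reverseRecOn with
  | nil => rfl
  | append_singleton xs x ih =>
    rw [pvBstate_append, pvIdx_append]
    show ((pvBstate xs).1.insert x ((xs.length : Int))).get? v = _
    rw [PySem.Dict.get?_insert]
    by_cases hv : v = x
    · simp [hv]
    · simp only [if_neg hv, List.append_nil]
      exact ih

theorem pvB_best (xs : List Int) : (pvBstate xs).2 = pvTotal xs := by
  induction xs using List.reverseRecOn with
  | nil => rfl
  | append_singleton xs x ih =>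
    rw [pvBstate_append]
    show (match (pvBstate xs).1.get? x with
          | some j => pvOmin (pvBstate xs).2 ((xs.length : Int) - j + 1)
          | none => (pvBstate xs).2) = _
    rw [pvB_last]
    by_cases hx : x ∈ xs
    · have hne : pvIdx xs x ≠ [] := fun he => ((pvIdx_nil_iff xs x).mp he) hx
      obtain ⟨j, hj⟩ : ∃ j, (pvIdx xs x).getLast? = some j := by
        cases hgl : (pvIdx xs x).getLast? with
        | none => exact absurd (List.getLast?_eq_none_iff.mp hgl) hne
        | some j => exact ⟨j, rfl⟩
      rw [hj, pvTotal_dup xs x hx, ih, hj]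
      rfl
    · rw [(pvIdx_nil_iff xs x).mpr hx, pvTotal_fresh xs x hx]
      exact ih

theorem pvAlt_eq (cards : List Int) :
    min_cards_to_pickup_alt cards
      = (match pvTotal cards with | some b => b | none => -1) := by
  show (match (pvBstate cards).2 with | some b => b | none => -1) = _
  rw [pvB_best]

-- ===== VERDICT (by name: the statement is the Claim_ definition above) =====
theorem min_cards_to_pickup_spec : Claim_equal_min_cards_to_pickup := by
  intro cards _
  show min_cards_to_pickup cards = min_cards_to_pickup_alt cards
  rw [pvA_eq, pvAlt_eq]
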